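-- pv_equiv track=rewrite | github.com/Elray326/CS-349 | HW1/ID3.py | calculateClassCounts
-- ===== SOURCE A (Python) =====
-- def calculateClassCounts(examples, attr):
--   valueClassCounts = dict()
--   attrTypes = set()
--   tot = 0
--   # Case for handling empty attributes
--   for e in examples:
--     attrRes = e[attr]
--     if attrRes == '?':
--       continue
--
--     if attrRes not in valueClassCounts:
--       valueClassCounts[attrRes] = dict()
--
--     if e["Class"] not in valueClassCounts[attrRes]:
--       valueClassCounts[attrRes][e["Class"]] = 0
--
--     valueClassCounts[attrRes][e["Class"]] += 1
--     attrTypes.add(attrRes)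
--     tot += 1
--   return valueClassCounts, attrTypes, tot
-- ===== SOURCE B (Python) =====
-- def calculateClassCounts(examples, attr):
--   # one flat counter keyed by (value, class), then reshape
--   counter = {}
--   for e in examples:
--     v = e[attr]
--     if v == '?':
--       continue
--     key = (v, e["Class"])
--     counter[key] = counter.get(key, 0) + 1
--   valueClassCounts = {}
--   for (v, c), n in counter.items():
--     valueClassCounts.setdefault(v, {})[c] = n
--   attrTypes = {v for (v, c) in counter}
--   tot = sum(counter.values())
--   return valueClassCounts, attrTypes, tot
-- ===== Notes on version B (the rewrite author's own statement) =====
-- stated objective: alternative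
-- what changed: A maintains the nested value->class->count dict, the value set and the total inline inside one loop; B builds a single flat counter keyed by (value, class) tuples and then derives the nested dict by a reshape pass, the value set from the counter's keys and the total as the sum of its values.
import Mathlib
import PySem

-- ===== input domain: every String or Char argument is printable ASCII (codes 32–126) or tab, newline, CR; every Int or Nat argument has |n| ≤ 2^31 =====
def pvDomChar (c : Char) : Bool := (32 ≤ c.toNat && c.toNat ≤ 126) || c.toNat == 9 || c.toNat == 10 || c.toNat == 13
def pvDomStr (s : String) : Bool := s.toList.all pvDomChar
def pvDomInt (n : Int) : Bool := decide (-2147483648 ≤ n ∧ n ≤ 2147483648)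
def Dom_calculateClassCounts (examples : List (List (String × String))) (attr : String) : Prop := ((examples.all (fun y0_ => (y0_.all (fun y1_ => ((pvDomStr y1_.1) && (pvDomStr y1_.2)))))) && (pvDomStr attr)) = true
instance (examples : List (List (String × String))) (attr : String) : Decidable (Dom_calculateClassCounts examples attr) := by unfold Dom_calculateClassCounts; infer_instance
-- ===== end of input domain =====

-- B replaces A's inline nested-dict/set/counter bookkeeping by one flat counter keyed by
-- (value, class) plus a reshape pass; equal return values, proved below (objective: alternative).

-- ===== PORT A =====
-- one iteration of A's `for e in examples` loop, acting on (valueClassCounts, attrTypes, tot)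
def ccStepA (attr : String)
    (st : PySem.Dict String (PySem.Dict String Int) × PySem.Set String × Int)
    (e : List (String × String)) :
    PySem.Dict String (PySem.Dict String Int) × PySem.Set String × Int :=
  let d := PySem.Dict.ofList e
  let attrRes := d.getD attr "?"          -- e[attr]; Pre_ guarantees the key is present
  if attrRes == "?" then st
  else
    let vcc := if st.1.contains attrRes then st.1 else st.1.insert attrRes PySem.Dict.empty
    let cls := d.getD "Class" ""          -- e["Class"]; Pre_ guarantees the key is present here
    let inner := vcc.getD attrRes PySem.Dict.empty
    let inner := if inner.contains cls then inner else inner.insert cls 0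
    let inner := inner.insert cls (inner.getD cls 0 + 1)
    (vcc.insert attrRes inner, PySem.Set.add st.2.1 attrRes, st.2.2 + 1)

def calculateClassCounts (examples : List (List (String × String))) (attr : String) :
    (List (String × List (String × Int))) × List String × Int :=
  let r := examples.foldl (ccStepA attr) (PySem.Dict.empty, PySem.Set.empty, 0)
  (r.1.items.map (fun p => (p.1, p.2.items)), r.2.1, r.2.2)

-- ===== PORT B =====
-- Source B first loop: build the flat counter keyed by (value, class)
def ccStepB (attr : String) (c : PySem.Dict (String × String) Int) (e : List (String × String)) :
    PySem.Dict (String × String) Int :=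
  let d := PySem.Dict.ofList e
  let v := d.getD attr "?"
  if v == "?" then c
  else
    let key := (v, d.getD "Class" "")
    c.insert key (c.getD key 0 + 1)

-- Source B second loop: `valueClassCounts.setdefault(v, {})[c] = n`
def ccReshapeStep (acc : PySem.Dict String (PySem.Dict String Int))
    (p : (String × String) × Int) : PySem.Dict String (PySem.Dict String Int) :=
  let acc1 := acc.setdefault p.1.1 PySem.Dict.empty
  acc1.insert p.1.1 ((acc1.getD p.1.1 PySem.Dict.empty).insert p.1.2 p.2)

def calculateClassCounts_alt (examples : List (List (String × String))) (attr : String) :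
    (List (String × List (String × Int))) × List String × Int :=
  let counter := examples.foldl (ccStepB attr) PySem.Dict.empty
  let vcc := counter.items.foldl ccReshapeStep PySem.Dict.empty
  let attrTypes := PySem.Set.ofList (counter.keys.map (·.1))
  let tot := counter.values.sum
  (vcc.items.map (fun p => (p.1, p.2.items)), attrTypes, tot)

-- ===== PRECONDITION & SPEC =====
-- Pre_ excludes exactly the inputs where Python A raises KeyError: a row without the attr key,
-- or a row whose attr value is not '?' but which lacks the "Class" key.
def Pre_calculateClassCounts (examples : List (List (String × String))) (attr : String) : Prop :=
  ∀ e ∈ examples, (PySem.Dict.ofList e).contains attr = true ∧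
    ((PySem.Dict.ofList e).getD attr "?" ≠ "?" → (PySem.Dict.ofList e).contains "Class" = true)
instance (examples : List (List (String × String))) (attr : String) :
    Decidable (Pre_calculateClassCounts examples attr) := by
  unfold Pre_calculateClassCounts; infer_instance

def pvWitness_calculateClassCounts : (List (List (String × String))) × String :=
  ([[("x", "a"), ("Class", "p")], [("x", "?")], [("x", "a"), ("Class", "n")]], "x")

def Spec_calculateClassCounts (examples : List (List (String × String))) (attr : String)
    (out : (List (String × List (String × Int))) × List String × Int) : Prop :=
  out = calculateClassCounts_alt examples attr
instance (examples : List (List (String × String))) (attr : String)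
    (out : (List (String × List (String × Int))) × List String × Int) :
    Decidable (Spec_calculateClassCounts examples attr out) := by
  unfold Spec_calculateClassCounts; infer_instance

-- ===== CLAIM (what is proved, stated in full; the proofs are below) =====
def Claim_equal_calculateClassCounts : Prop := ∀ (examples : List (List (String × String))) (attr : String), Dom_calculateClassCounts examples attr → Pre_calculateClassCounts examples attr → Spec_calculateClassCounts examples attr (calculateClassCounts examples attr)

-- ===== LEMMAS AND PROOFS =====

-- The common per-row key extraction both loops perform: none = row skipped.
def pvKeyOf (attr : String) (e : List (String × String)) : Option (String × String) :=
  let d := PySem.Dict.ofList e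
  let v := d.getD attr "?"
  if v == "?" then none else some (v, d.getD "Class" "")

-- A's loop body on an already-extracted (value, class) key
def pvCoreA (st : PySem.Dict String (PySem.Dict String Int) × PySem.Set String × Int)
    (k : String × String) :
    PySem.Dict String (PySem.Dict String Int) × PySem.Set String × Int :=
  let vcc := if st.1.contains k.1 then st.1 else st.1.insert k.1 PySem.Dict.empty
  let inner := vcc.getD k.1 PySem.Dict.empty
  let inner := if inner.contains k.2 then inner else inner.insert k.2 0
  let inner := inner.insert k.2 (inner.getD k.2 0 + 1)
  (vcc.insert k.1 inner, PySem.Set.add st.2.1 k.1, st.2.2 + 1)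

-- B's counter loop body on an already-extracted key
def pvCoreB (c : PySem.Dict (String × String) Int) (k : String × String) :
    PySem.Dict (String × String) Int :=
  c.insert k (c.getD k 0 + 1)

-- classes observed for value v, in order of appearance
def pvClsOf (ks : List (String × String)) (v : String) : List String :=
  (ks.filter (fun k => k.1 == v)).map (·.2)

-- closed form of the nested dictionary, for an arbitrary weight per (value, class) key
def pvVccW (ks : List (String × String)) (w : String × String → Int) :
    PySem.Dict String (PySem.Dict String Int) :=
  PySem.Dict.mk ((PySem.List.dedup (ks.map (·.1))).map (fun v =>
    (v, PySem.Dict.mk ((PySem.List.dedup (pvClsOf ks v)).map (fun c => (c, w (v, c)))))))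

def pvVccSpec (ks : List (String × String)) : PySem.Dict String (PySem.Dict String Int) :=
  pvVccW ks (fun k => ((ks.count k : Nat) : Int))

lemma pv_stepA_eq (attr : String) (st) (e) :
    ccStepA attr st e = match pvKeyOf attr e with | none => st | some k => pvCoreA st k := by
  by_cases h : ((PySem.Dict.ofList e).getD attr "?" == "?") = true <;>
    simp [ccStepA, pvKeyOf, pvCoreA, h]

lemma pv_stepB_eq (attr : String) (c) (e) :
    ccStepB attr c e = match pvKeyOf attr e with | none => c | some k => pvCoreB c k := by
  by_cases h : ((PySem.Dict.ofList e).getD attr "?" == "?") = true <;>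
    simp [ccStepB, pvKeyOf, pvCoreB, h]

lemma pv_ofList_append_singleton {α : Type} [BEq α] (l : List α) (x : α) :
    PySem.Set.ofList (l ++ [x]) = PySem.Set.add (PySem.Set.ofList l) x := by
  simp [PySem.Set.ofList_eq_foldl, List.foldl_append]

lemma pv_add_of_mem {α : Type} [BEq α] [LawfulBEq α] (s : PySem.Set α) (x : α) (h : x ∈ s) :
    PySem.Set.add s x = s := by
  simp [PySem.Set.add, h]

lemma pv_add_of_not_mem {α : Type} [BEq α] [LawfulBEq α] (s : PySem.Set α) (x : α) (h : x ∉ s) :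
    PySem.Set.add s x = s ++ [x] := by
  simp [PySem.Set.add, h]

lemma pv_ofList_map_ofList {α β : Type} [BEq α] [LawfulBEq α] [BEq β] [LawfulBEq β]
    (f : α → β) (l : List α) :
    PySem.Set.ofList ((PySem.Set.ofList l).map f) = PySem.Set.ofList (l.map f) := by
  induction l using List.reverseRecOn with
  | nil => rfl
  | append_singleton t x ih =>
    rw [show (t ++ [x]).map f = t.map f ++ [f x] by simp,
        PySem.Set.ofList_eq_foldl (t ++ [x]), List.foldl_append,
        ← PySem.Set.ofList_eq_foldl]
    simp only [List.foldl_cons, List.foldl_nil]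
    by_cases hx : x ∈ PySem.Set.ofList t
    · rw [pv_add_of_mem _ _ hx, ih]
      have : f x ∈ PySem.Set.ofList (t.map f) := by
        rw [PySem.Set.mem_ofList]
        exact List.mem_map_of_mem ((PySem.Set.mem_ofList t x).mp hx)
      rw [pv_ofList_append_singleton, pv_add_of_mem _ _ this]
    · rw [pv_add_of_not_mem _ _ hx]
      rw [show (PySem.Set.ofList t ++ [x]).map f = (PySem.Set.ofList t).map f ++ [f x] by simp]
      rw [pv_ofList_append_singleton, ih, pv_ofList_append_singleton]

-- lookups/updates on a dictionary of the literal shape `Dict.mk (xs.map fun u => (u, f u))`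
lemma pv_contains_mk_map {β : Type} (xs : List String) (f : String → β) (v : String) :
    (PySem.Dict.mk (xs.map fun u => (u, f u))).contains v = xs.contains v := by
  simp only [PySem.Dict.contains_mk, List.any_map]
  simp [List.any_eq]

lemma pv_getD_mk_map {β : Type} (xs : List String) (f : String → β) (v : String) (d0 : β)
    (h : v ∈ xs) :
    (PySem.Dict.mk (xs.map fun u => (u, f u))).getD v d0 = f v := by
  induction xs with
  | nil => cases h
  | cons a t ih =>
    by_cases hav : a = v
    · subst hav; simp [PySem.Dict.getD_eq_get?_getD, PySem.Dict.get?_mk_cons]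
    · have hvt : v ∈ t := by cases h with | head => exact absurd rfl hav | tail _ h => exact h
      have := ih hvt
      simp [PySem.Dict.getD_eq_get?_getD, PySem.Dict.get?_mk_cons, hav] at this ⊢
      simpa [PySem.Dict.getD_eq_get?_getD] using this

lemma pv_insert_mk_map {β : Type} (xs : List String) (f : String → β) (v : String) (w : β)
    (h : v ∈ xs) :
    (PySem.Dict.mk (xs.map fun u => (u, f u))).insert v w
      = PySem.Dict.mk (xs.map fun u => (u, if u = v then w else f u)) := by
  apply PySem.Dict.ext
  have hc : (PySem.Dict.mk (xs.map fun u => (u, f u))).contains v = true := by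
    simp [PySem.Dict.contains_mk, List.any_eq]; exact h
  rw [PySem.Dict.items_insert]
  simp only [hc, if_true]
  show List.map _ (xs.map fun u => (u, f u)) = xs.map fun u => (u, if u = v then w else f u)
  rw [List.map_map]
  apply List.map_congr_left
  intro u hu
  by_cases huv : u = v <;> simp [huv]

lemma pv_insert_mk_map_fresh {β : Type} (xs : List String) (f : String → β) (v : String) (w : β)
    (h : v ∉ xs) :
    (PySem.Dict.mk (xs.map fun u => (u, f u))).insert v w
      = PySem.Dict.mk ((xs ++ [v]).map fun u => (u, if u = v then w else f u)) := by
  apply PySem.Dict.ext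
  have hc : (PySem.Dict.mk (xs.map fun u => (u, f u))).contains v = false := by
    simp [PySem.Dict.contains_mk, List.any_eq]; exact h
  rw [PySem.Dict.items_insert]
  simp only [hc, Bool.false_eq_true, if_false]
  show (xs.map fun u => (u, f u)) ++ [(v, w)]
      = (xs ++ [v]).map fun u => (u, if u = v then w else f u)
  rw [List.map_append]
  congr 1
  · apply List.map_congr_left
    intro u hu
    have : u ≠ v := fun e => h (e ▸ hu)
    simp [this]
  · simp

lemma pv_empty_insert {ν : Type} (c : String) (x : ν) :
    (PySem.Dict.empty : PySem.Dict String ν).insert c x = PySem.Dict.mk [(c, x)] := by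
  apply PySem.Dict.ext
  rw [PySem.Dict.items_insert]
  simp only [PySem.Dict.contains_empty, Bool.false_eq_true, if_false]
  rfl

lemma pv_clsOf_append (ks : List (String × String)) (k : String × String) (v : String) :
    pvClsOf (ks ++ [k]) v = pvClsOf ks v ++ (if k.1 = v then [k.2] else []) := by
  by_cases h : k.1 = v <;> simp [pvClsOf, List.filter_append, h]

lemma pv_clsOf_of_not_mem (ks : List (String × String)) (v : String)
    (h : v ∉ ks.map (·.1)) : pvClsOf ks v = [] := by
  have : ∀ k ∈ ks, ¬ (k.1 == v) = true := by
    intro k hk hb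
    exact h (List.mem_map.mpr ⟨k, hk, by simpa using hb⟩)
  simp [pvClsOf, List.filter_eq_nil_iff.mpr this]

lemma pv_mem_clsOf (ks : List (String × String)) (v c : String) :
    c ∈ pvClsOf ks v ↔ (v, c) ∈ ks := by
  simp only [pvClsOf, List.mem_map, List.mem_filter]
  constructor
  · rintro ⟨k, ⟨hk, hv⟩, hc⟩
    have : k = (v, c) := by
      cases k; simp at hv hc; simp [hv, hc]
    exact this ▸ hk
  · intro h
    exact ⟨(v, c), ⟨h, by simp⟩, rfl⟩

lemma pv_count_append_pair (t : List (String × String)) (k p : String × String) :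
    (t ++ [k]).count p = t.count p + (if p = k then 1 else 0) := by
  rw [List.count_append]
  by_cases h : p = k
  · simp [h]
  · simp [List.count_singleton, h, beq_iff_eq]
    exact fun e => h e.symm

-- B's reshape of any weight table over the distinct keys computes the closed form
lemma pv_reshape (ks : List (String × String)) (w : String × String → Int) :
    ((PySem.Set.ofList ks).map (fun k => (k, w k))).foldl ccReshapeStep PySem.Dict.empty
      = pvVccW ks w := by
  induction ks using List.reverseRecOn with
  | nil => rfl
  | append_singleton t k ih =>
    rw [pv_ofList_append_singleton]
    by_cases hk : k ∈ PySem.Set.ofList t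
    · -- duplicate counter key: key set and closed-form key structure are unchanged
      rw [pv_add_of_mem _ _ hk, ih]
      have hkt : k ∈ t := (PySem.Set.mem_ofList t k).mp hk
      have hv : k.1 ∈ t.map (·.1) := List.mem_map_of_mem hkt
      unfold pvVccW
      rw [show (t ++ [k]).map (·.1) = t.map (·.1) ++ [k.1] by simp]
      simp only [PySem.List.dedup_eq_ofList]
      rw [pv_ofList_append_singleton,
          pv_add_of_mem _ _ (by rwa [PySem.Set.mem_ofList])]
      congr 1
      apply List.map_congr_left
      intro u hu
      rw [pv_clsOf_append]
      by_cases huv : k.1 = u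
      · subst huv
        have hc : k.2 ∈ pvClsOf t k.1 := (pv_mem_clsOf t k.1 k.2).mpr (by simpa using hkt)
        rw [if_pos rfl]
        rw [pv_ofList_append_singleton,
            pv_add_of_mem _ _ (by rwa [PySem.Set.mem_ofList])]
      · simp [huv]
    · -- fresh counter key: one reshape step writes the one new (value, class) slot
      rw [pv_add_of_not_mem _ _ hk]
      rw [List.map_append, List.foldl_append, ih]
      have hkt : k ∉ t := fun h => hk ((PySem.Set.mem_ofList t k).mpr h)
      simp only [List.map_cons, List.map_nil, List.foldl_cons, List.foldl_nil]
      unfold pvVccW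
      simp only [ccReshapeStep, PySem.List.dedup_eq_ofList]
      rw [show (t ++ [k]).map (·.1) = t.map (·.1) ++ [k.1] by simp]
      rw [pv_ofList_append_singleton]
      by_cases hv : k.1 ∈ t.map (·.1)
      · have hv' : k.1 ∈ PySem.Set.ofList (t.map (·.1)) := (PySem.Set.mem_ofList _ _).mpr hv
        rw [pv_add_of_mem _ _ hv']
        have hcont : (PySem.Dict.mk ((PySem.Set.ofList (t.map (·.1))).map (fun v =>
            (v, PySem.Dict.mk ((PySem.Set.ofList (pvClsOf t v)).map
              (fun c => (c, w (v, c)))))))).contains k.1 = true := by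
          rw [pv_contains_mk_map]; simpa using hv'
        rw [PySem.Dict.setdefault_of_contains _ _ hcont]
        rw [pv_getD_mk_map _ _ _ _ hv']
        have hcfresh : k.2 ∉ PySem.Set.ofList (pvClsOf t k.1) := by
          rw [PySem.Set.mem_ofList, pv_mem_clsOf]
          intro h; exact hkt (by simpa using h)
        rw [pv_insert_mk_map_fresh _ _ _ _ hcfresh]
        rw [pv_insert_mk_map _ _ _ _ hv']
        apply PySem.Dict.ext
        show List.map _ _ = List.map _ _
        apply List.map_congr_left
        intro u hu
        by_cases huv : u = k.1
        · subst huv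
          rw [if_pos rfl, pv_clsOf_append, if_pos rfl]
          rw [pv_ofList_append_singleton, pv_add_of_not_mem _ _ hcfresh]
          congr 1
          apply PySem.Dict.ext
          show List.map _ _ = List.map _ _
          apply List.map_congr_left
          intro c hc
          by_cases hck : c = k.2 <;> simp [hck]
        · rw [if_neg huv, pv_clsOf_append, if_neg (fun h => huv h.symm)]
          simp
      · have hv' : k.1 ∉ PySem.Set.ofList (t.map (·.1)) :=
          fun h => hv ((PySem.Set.mem_ofList _ _).mp h)
        rw [pv_add_of_not_mem _ _ hv']
        have hcont : (PySem.Dict.mk ((PySem.Set.ofList (t.map (·.1))).map (fun v =>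
            (v, PySem.Dict.mk ((PySem.Set.ofList (pvClsOf t v)).map
              (fun c => (c, w (v, c)))))))).contains k.1 = false := by
          rw [pv_contains_mk_map]; simpa using hv'
        rw [PySem.Dict.setdefault_of_not_contains _ _ hcont]
        rw [pv_insert_mk_map_fresh _ _ _ _ hv']
        rw [pv_getD_mk_map _ _ _ _ (by simp : k.1 ∈ PySem.Set.ofList (t.map (·.1)) ++ [k.1])]
        rw [if_pos rfl, pv_empty_insert]
        rw [pv_insert_mk_map _ _ _ _ (by simp : k.1 ∈ PySem.Set.ofList (t.map (·.1)) ++ [k.1])]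
        apply PySem.Dict.ext
        show List.map _ _ = List.map _ _
        apply List.map_congr_left
        intro u hu
        by_cases huv : u = k.1
        · subst huv
          rw [if_pos rfl, pv_clsOf_append, if_pos rfl, pv_clsOf_of_not_mem t k.1 hv]
          simp [PySem.Set.ofList_eq_foldl, PySem.Set.add]
        · rw [if_neg huv, if_neg huv, pv_clsOf_append, if_neg (fun h => huv h.symm)]
          simp

-- A's fold computes the same closed form, weighted by the occurrence counts
lemma pv_mainA (ks : List (String × String)) :
    ks.foldl pvCoreA (PySem.Dict.empty, PySem.Set.empty, 0)
      = (pvVccSpec ks, PySem.List.dedup (ks.map (·.1)), (ks.length : Int)) := by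
  induction ks using List.reverseRecOn with
  | nil => rfl
  | append_singleton t k ih =>
    rw [List.foldl_append, ih]
    simp only [List.foldl_cons, List.foldl_nil]
    simp only [pvCoreA, pvVccSpec, pvVccW, PySem.List.dedup_eq_ofList]
    rw [show (t ++ [k]).map (·.1) = t.map (·.1) ++ [k.1] by simp]
    rw [pv_ofList_append_singleton]
    simp only [Prod.mk.injEq]
    refine ⟨?_, trivial, by simp⟩
    by_cases hv : k.1 ∈ t.map (·.1)
    · have hv' : k.1 ∈ PySem.Set.ofList (t.map (·.1)) := (PySem.Set.mem_ofList _ _).mpr hv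
      rw [pv_add_of_mem _ _ hv']
      rw [if_pos (by rw [pv_contains_mk_map]; simpa using hv')]
      rw [pv_getD_mk_map _ _ _ _ hv']
      by_cases hc : k.2 ∈ pvClsOf t k.1
      · have hc' : k.2 ∈ PySem.Set.ofList (pvClsOf t k.1) := (PySem.Set.mem_ofList _ _).mpr hc
        have hkt : (k.1, k.2) ∈ t := (pv_mem_clsOf t k.1 k.2).mp hc
        rw [if_pos (by rw [pv_contains_mk_map]; simpa using hc')]
        rw [pv_getD_mk_map _ _ _ _ hc']
        rw [pv_insert_mk_map _ _ _ _ hc']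
        rw [pv_insert_mk_map _ _ _ _ hv']
        apply PySem.Dict.ext
        show List.map _ _ = List.map _ _
        apply List.map_congr_left
        intro u hu
        by_cases huv : u = k.1
        · subst huv
          rw [if_pos rfl, pv_clsOf_append, if_pos rfl]
          rw [pv_ofList_append_singleton, pv_add_of_mem _ _ hc']
          simp only [Prod.mk.injEq, true_and]
          congr 1
          apply List.map_congr_left
          intro c hcm
          by_cases hck : c = k.2
          · subst hck
            rw [if_pos rfl, pv_count_append_pair]
            simp
          · rw [if_neg hck, pv_count_append_pair]
            have hne : (k.1, c) ≠ k := fun e => hck (congrArg Prod.snd e)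
            simp [hne]
        · rw [if_neg huv, pv_clsOf_append, if_neg (fun h => huv h.symm)]
          simp only [List.append_nil, Prod.mk.injEq, true_and]
          congr 1
          apply List.map_congr_left
          intro c hcm
          rw [pv_count_append_pair]
          have hne : (u, c) ≠ k := fun e => huv (congrArg Prod.fst e)
          simp [hne]
      · have hc' : k.2 ∉ PySem.Set.ofList (pvClsOf t k.1) :=
          fun h => hc ((PySem.Set.mem_ofList _ _).mp h)
        have hkt : (k.1, k.2) ∉ t := fun h => hc ((pv_mem_clsOf t k.1 k.2).mpr h)
        rw [if_neg (by rw [pv_contains_mk_map]; simpa using hc')]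
        rw [pv_insert_mk_map_fresh _ _ _ _ hc']
        rw [pv_getD_mk_map _ _ _ _ (by simp : k.2 ∈ PySem.Set.ofList (pvClsOf t k.1) ++ [k.2])]
        rw [if_pos rfl]
        rw [pv_insert_mk_map _ _ _ _ (by simp : k.2 ∈ PySem.Set.ofList (pvClsOf t k.1) ++ [k.2])]
        rw [pv_insert_mk_map _ _ _ _ hv']
        apply PySem.Dict.ext
        show List.map _ _ = List.map _ _
        apply List.map_congr_left
        intro u hu
        by_cases huv : u = k.1
        · subst huv
          rw [if_pos rfl, pv_clsOf_append, if_pos rfl]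
          rw [pv_ofList_append_singleton, pv_add_of_not_mem _ _ hc']
          simp only [Prod.mk.injEq, true_and]
          congr 1
          apply List.map_congr_left
          intro c hcm
          by_cases hck : c = k.2
          · subst hck
            rw [pv_count_append_pair]
            have : t.count (k.1, k.2) = 0 := List.count_eq_zero.mpr hkt
            simp [this]
          · rw [if_neg hck, if_neg hck, pv_count_append_pair]
            have hne : (k.1, c) ≠ k := fun e => hck (congrArg Prod.snd e)
            simp [hne]
        · rw [if_neg huv, pv_clsOf_append]
          have hne0 : k.1 ≠ u := fun h => huv h.symm
          simp only [if_neg hne0, List.append_nil, Prod.mk.injEq, true_and]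
          congr 1
          apply List.map_congr_left
          intro c hcm
          rw [pv_count_append_pair]
          have hne : (u, c) ≠ k := fun e => huv (congrArg Prod.fst e)
          simp [hne]
    · have hv' : k.1 ∉ PySem.Set.ofList (t.map (·.1)) :=
        fun h => hv ((PySem.Set.mem_ofList _ _).mp h)
      have hkt : (k.1, k.2) ∉ t := fun h => hv (List.mem_map_of_mem h)
      rw [pv_add_of_not_mem _ _ hv']
      rw [if_neg (by rw [pv_contains_mk_map]; simpa using hv')]
      rw [pv_insert_mk_map_fresh _ _ _ _ hv']
      rw [pv_getD_mk_map _ _ _ _ (by simp : k.1 ∈ PySem.Set.ofList (t.map (·.1)) ++ [k.1])]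
      rw [if_pos rfl]
      rw [show ((PySem.Dict.empty : PySem.Dict String Int).contains k.2) = false from
        PySem.Dict.contains_empty k.2]
      simp only [Bool.false_eq_true, if_false]
      rw [pv_empty_insert]
      rw [show (PySem.Dict.mk [(k.2, (0 : Int))]).getD k.2 0 = 0 from by
        simp [PySem.Dict.getD_eq_get?_getD, PySem.Dict.get?_mk_cons]]
      rw [show (PySem.Dict.mk [(k.2, (0 : Int))]).insert k.2 (0 + 1)
            = PySem.Dict.mk [(k.2, (1 : Int))] from by
        apply PySem.Dict.ext
        rw [PySem.Dict.items_insert]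
        simp [PySem.Dict.contains_mk]]
      rw [pv_insert_mk_map _ _ _ _ (by simp : k.1 ∈ PySem.Set.ofList (t.map (·.1)) ++ [k.1])]
      apply PySem.Dict.ext
      show List.map _ _ = List.map _ _
      apply List.map_congr_left
      intro u hu
      by_cases huv : u = k.1
      · subst huv
        rw [if_pos rfl, pv_clsOf_append, if_pos rfl, pv_clsOf_of_not_mem t k.1 hv]
        have : t.count (k.1, k.2) = 0 := List.count_eq_zero.mpr hkt
        simp [PySem.Set.ofList_eq_foldl, PySem.Set.add, this]
      · rw [if_neg huv, if_neg huv, pv_clsOf_append, if_neg (fun h => huv h.symm)]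
        simp only [List.append_nil, Prod.mk.injEq, true_and]
        congr 1
        apply List.map_congr_left
        intro c hcm
        rw [pv_count_append_pair]
        have hne : (u, c) ≠ k := fun e => huv (congrArg Prod.fst e)
        simp [hne]

lemma pv_cast_sum (l : List Nat) : ((l.sum : Nat) : Int) = (l.map (Nat.cast : Nat → Int)).sum := by
  induction l with
  | nil => rfl
  | cons a t ih => simp only [List.map_cons, List.sum_cons, Nat.cast_add, ih]

lemma pv_sum_counts (ks : List (String × String)) :
    (((PySem.Set.ofList ks).map (fun k => ((ks.count k : Nat) : Int))).sum)
      = (ks.length : Int) := by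
  have hperm : (PySem.Set.ofList ks).Perm ks.dedup := by
    apply (List.perm_ext_iff_of_nodup (PySem.Set.nodup_ofList ks) ks.nodup_dedup).mpr
    intro a
    rw [PySem.Set.mem_ofList, List.mem_dedup]
  rw [(hperm.map (fun k => ((ks.count k : Nat) : Int))).sum_eq]
  rw [show (fun k => ((ks.count k : Nat) : Int))
        = ((Nat.cast : Nat → Int) ∘ fun k => ks.count k) from rfl]
  rw [← List.map_map, ← pv_cast_sum]
  have hcnt : (fun k : String × String => List.count k ks)
      = (fun k => @List.count _ instBEqOfDecidableEq k ks) := by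
    funext x
    rw [@List.count_eq_countP _ instBEqProd, @List.count_eq_countP _ instBEqOfDecidableEq]
    apply List.countP_congr
    intro a _
    constructor
    · intro h; simpa using (by simpa using h : a = x)
    · intro h; simpa using (by simpa using h : a = x)
  rw [hcnt]
  exact congrArg (Nat.cast : Nat → Int) (List.sum_map_count_dedup_eq_length ks)

lemma pv_foldA (attr : String) :
    ∀ (l : List (List (String × String)))
      (s : PySem.Dict String (PySem.Dict String Int) × PySem.Set String × Int),
      l.foldl (ccStepA attr) s = (l.filterMap (pvKeyOf attr)).foldl pvCoreA s := by
  intro l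
  induction l with
  | nil => intro s; rfl
  | cons a t ih =>
    intro s
    rw [List.foldl_cons, pv_stepA_eq, ih]
    cases h : pvKeyOf attr a <;> simp [h]

lemma pv_foldB (attr : String) :
    ∀ (l : List (List (String × String))) (c : PySem.Dict (String × String) Int),
      l.foldl (ccStepB attr) c = (l.filterMap (pvKeyOf attr)).foldl pvCoreB c := by
  intro l
  induction l with
  | nil => intro c; rfl
  | cons a t ih =>
    intro c
    rw [List.foldl_cons, pv_stepB_eq, ih]
    cases h : pvKeyOf attr a <;> simp [h]

theorem pv_main (examples : List (List (String × String))) (attr : String) :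
    calculateClassCounts examples attr = calculateClassCounts_alt examples attr := by
  simp only [calculateClassCounts, calculateClassCounts_alt]
  rw [pv_foldA attr examples, pv_foldB attr examples]
  rw [pv_mainA]
  rw [show List.foldl pvCoreB PySem.Dict.empty (examples.filterMap (pvKeyOf attr))
        = PySem.Dict.counter (examples.filterMap (pvKeyOf attr)) from by
    rw [← PySem.Dict.foldl_insert_getD_add_one_eq_counter]; rfl]
  rw [PySem.Dict.items_counter, pv_reshape, PySem.Dict.keys_counter, pv_ofList_map_ofList]
  have hvals : (PySem.Dict.counter (examples.filterMap (pvKeyOf attr))).values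
      = ((PySem.Set.ofList (examples.filterMap (pvKeyOf attr))).map
          (fun k => (((examples.filterMap (pvKeyOf attr)).count k : Nat) : Int))) := by
    show (PySem.Dict.counter (examples.filterMap (pvKeyOf attr))).items.map (·.2) = _
    rw [PySem.Dict.items_counter, List.map_map]
    rfl
  rw [hvals, pv_sum_counts]
  rw [show pvVccW (examples.filterMap (pvKeyOf attr))
        (fun k => (((examples.filterMap (pvKeyOf attr)).count k : Nat) : Int))
      = pvVccSpec (examples.filterMap (pvKeyOf attr)) from rfl]
  rw [PySem.List.dedup_eq_ofList]

-- ===== VERDICT (by name: the statement is the Claim_ definition above) =====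
theorem calculateClassCounts_spec : Claim_equal_calculateClassCounts := by
  intro examples attr _ _
  unfold Spec_calculateClassCounts
  exact pv_main examples attr
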